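-- pv_equiv track=rewrite | github.com/ChenxinAn-fdu/CoLo | extractive/model/model.py | check_n_gram
-- ===== SOURCE A (Python) =====
-- def check_n_gram(sentences, n):
--     all_sents = sentences[0]
--     for sentence in sentences[1:]:
--         tokens = sentence.split(' ')
--         s_len = len(tokens)
--         for i in range(s_len):
--             if i + n > s_len:
--                 break
--             if ' '.join(tokens[i: i + n]) in all_sents:
--                 return False
--         all_sents = all_sents + " " + sentence
--     return True  # no n_gram overlap
-- ===== SOURCE B (Python) =====
-- def _ord_sum(s):
--     total = 0
--     for ch in s:
--         total += ord(ch)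
--     return total
--
--
-- def _occurs(pattern, text):
--     # Rabin-Karp style search: rolling checksum (sum of character codes)
--     # filter over a sliding window, with exact verification on a hit.
--     m = len(pattern)
--     if m > len(text):
--         return False
--     target = _ord_sum(pattern)
--     window = _ord_sum(text[:m])
--     j = 0
--     while True:
--         if window == target and text[j:j + m] == pattern:
--             return True
--         if j + m >= len(text):
--             return False
--         window += ord(text[j + m]) - ord(text[j])
--         j += 1
--
--
-- def check_n_gram(sentences, n):
--     if n <= 0:
--         # the empty n-gram occurs in any text, so any later sentence overlaps
--         return len(sentences) == 1
--     text = sentences[0]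
--     for sentence in sentences[1:]:
--         tokens = sentence.split(' ')
--         for i in range(len(tokens) - n + 1):
--             if _occurs(' '.join(tokens[i:i + n]), text):
--                 return False
--         text = text + " " + sentence
--     return True
-- ===== Notes on version B (the rewrite author's own statement) =====
-- stated objective: alternative
-- what changed: B replaces Python's built-in substring test ('ngram in all_sents') with a hand-written Rabin-Karp style search: a rolling checksum (sum of character codes) slides a window over the accumulated text and only a checksum hit triggers an exact slice comparison; the degenerate n <= 0 case (empty n-gram matches any text) is folded into a closed form.
-- outside the precondition, e.g. on check_n_gram([], 2): A raises IndexError, B raises IndexError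
import Mathlib
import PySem

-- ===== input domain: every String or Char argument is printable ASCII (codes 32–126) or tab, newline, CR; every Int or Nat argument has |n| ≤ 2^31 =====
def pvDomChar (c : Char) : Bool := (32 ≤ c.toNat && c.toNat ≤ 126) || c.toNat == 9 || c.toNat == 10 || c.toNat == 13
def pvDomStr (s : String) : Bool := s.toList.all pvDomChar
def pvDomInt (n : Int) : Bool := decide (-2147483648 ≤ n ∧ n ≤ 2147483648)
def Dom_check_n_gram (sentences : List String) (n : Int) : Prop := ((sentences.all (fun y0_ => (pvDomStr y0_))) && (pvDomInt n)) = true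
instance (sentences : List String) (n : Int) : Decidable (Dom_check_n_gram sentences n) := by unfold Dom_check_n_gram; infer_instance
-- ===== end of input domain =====

-- B replaces the built-in substring test by a hand-written rolling-checksum (Rabin-Karp style)
-- search with exact verification, and folds the degenerate n <= 0 case into a closed form (alternative algorithm, no speed claim).

-- ===== PORT A =====
-- inner loop: for i in range(s_len): if i+n > s_len: break; if ' '.join(tokens[i:i+n]) in all_sents: return False
def innerA (tokens : List String) (allSents : String) (n : Int) : List Int → Bool
  | [] => false
  | i :: rest =>
    if (tokens.length : Int) < i + n then false
    else if PySem.Str.isIn (PySem.Str.join " " (PySem.List.slice tokens (some i) (some (i + n)))) allSents then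
      true
    else innerA tokens allSents n rest

def goA : List String → String → Int → Bool
  | [], _, _ => true
  | sentence :: rest, allSents, n =>
    let tokens := (PySem.Str.split? sentence " ").getD []  -- sep " " ≠ "" so split? is some (exact)
    if innerA tokens allSents n (PySem.List.pyRange 0 (tokens.length : Int)) then false
    else goA rest (allSents ++ " " ++ sentence) n

def check_n_gram (sentences : List String) (n : Int) : Bool :=
  match sentences with
  | [] => false  -- Python raises IndexError on sentences[0]; excluded by Pre_
  | s0 :: rest => goA rest s0 n

-- ===== PORT B =====
-- def _ord_sum(s): total = 0; for ch in s: total += ord(ch); return total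
def ordSum (cs : List Char) : Int := cs.foldl (fun t c => t + (c.toNat : Int)) 0

-- the while-True loop of _occurs; fuel only makes the loop total (j grows towards len(text))
def occursAux (pat text : List Char) (target : Int) : Nat → Int → Nat → Bool
  | 0, _, _ => false  -- unreachable: fuel > number of iterations
  | fuel + 1, window, j =>
    -- if window == target and text[j:j+m] == pattern: return True   (text[j:j+m] = (drop j).take m, exact by PySem.List.slice_natCast_add)
    if window = target ∧ (text.drop j).take pat.length = pat then true
    -- if j + m >= len(text): return False
    else if text.length ≤ j + pat.length then false
    -- window += ord(text[j+m]) - ord(text[j]); j += 1   (both indices in range here, so getD is exact)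
    else occursAux pat text target fuel
      (window + ((text.getD (j + pat.length) ' ').toNat : Int) - ((text.getD j ' ').toNat : Int))
      (j + 1)

def occursChars (pat text : List Char) : Bool :=
  if text.length < pat.length then false
  else occursAux pat text (ordSum pat) (text.length + 1) (ordSum (text.take pat.length)) 0

def occursStr (pat text : String) : Bool := occursChars pat.toList text.toList

def goB : List String → String → Int → Bool
  | [], _, _ => true
  | sentence :: rest, text, n =>
    let tokens := (PySem.Str.split? sentence " ").getD []  -- sep " " ≠ "" so split? is some (exact)
    -- for i in range(len(tokens) - n + 1): if _occurs(' '.join(tokens[i:i+n]), text): return False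
    if (PySem.List.pyRange 0 ((tokens.length : Int) - n + 1)).any
        (fun i => occursStr (PySem.Str.join " " (PySem.List.slice tokens (some i) (some (i + n)))) text) then
      false
    else goB rest (text ++ " " ++ sentence) n

def check_n_gram_alt (sentences : List String) (n : Int) : Bool :=
  if n ≤ 0 then sentences.length == 1
  else
    match sentences with
    | [] => false  -- Python raises IndexError on sentences[0]; excluded by Pre_
    | s0 :: rest => goB rest s0 n

-- ===== PRECONDITION & SPEC =====
-- A evaluates sentences[0] first, so it raises IndexError exactly on the empty list; Pre_ excludes only that.
def Pre_check_n_gram (sentences : List String) (n : Int) : Prop := sentences ≠ []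
instance (sentences : List String) (n : Int) : Decidable (Pre_check_n_gram sentences n) := by unfold Pre_check_n_gram; infer_instance
def pvWitness_check_n_gram : List String × Int := (["a b c", "b c d"], 2)

def Spec_check_n_gram (sentences : List String) (n : Int) (out : Bool) : Prop := out = check_n_gram_alt sentences n
instance (sentences : List String) (n : Int) (out : Bool) : Decidable (Spec_check_n_gram sentences n out) := by unfold Spec_check_n_gram; infer_instance

-- ===== CLAIM (what is proved, stated in full; the proofs are below) =====
def Claim_equal_check_n_gram : Prop := ∀ (sentences : List String) (n : Int), Dom_check_n_gram sentences n → Pre_check_n_gram sentences n → Spec_check_n_gram sentences n (check_n_gram sentences n)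

-- ===== LEMMAS AND PROOFS =====

lemma ordSum_eq (cs : List Char) : ordSum cs = (cs.map (fun c => (c.toNat : Int))).sum := by
  simpa [ordSum] using PySem.List.foldl_add cs (fun c => (c.toNat : Int)) 0

lemma ordSum_cons (c : Char) (cs : List Char) : ordSum (c :: cs) = (c.toNat : Int) + ordSum cs := by
  simp [ordSum_eq]

lemma ordSum_append (a b : List Char) : ordSum (a ++ b) = ordSum a + ordSum b := by
  simp [ordSum_eq]

-- rolling-checksum step: sliding the window one position right
lemma ordSum_roll (text : List Char) (k j : Nat) (h : j + (k + 1) < text.length) :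
    ordSum ((text.drop j).take (k + 1)) + ((text.getD (j + (k + 1)) ' ').toNat : Int)
      - ((text.getD j ' ').toNat : Int)
    = ordSum ((text.drop (j + 1)).take (k + 1)) := by
  have hj : j < text.length := by omega
  have hjk : j + (k + 1) < text.length := h
  have hdrop : text.drop j = text[j] :: text.drop (j + 1) := List.drop_eq_getElem_cons hj
  have hk' : k < (text.drop (j + 1)).length := by
    rw [List.length_drop]; omega
  have htake : (text.drop (j + 1)).take (k + 1)
      = (text.drop (j + 1)).take k ++ [(text.drop (j + 1))[k]] := by
    rw [List.take_add_one, List.getElem?_eq_getElem hk']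
    rfl
  have hidx : (text.drop (j + 1))[k] = text[j + 1 + k] := by
    rw [List.getElem_drop]
  have hgd1 : text.getD (j + (k + 1)) ' ' = text[j + (k + 1)] := List.getD_eq_getElem text ' ' hjk
  have hgd2 : text.getD j ' ' = text[j] := List.getD_eq_getElem text ' ' hj
  have hsame : text[j + 1 + k] = text[j + (k + 1)] := by
    congr 1; omega
  rw [hdrop, List.take_succ_cons, ordSum_cons, htake, ordSum_append, hidx, hsame, hgd1, hgd2]
  simp [ordSum_eq]
  ring

lemma occursAux_iff (pat text : List Char) (hm : 1 ≤ pat.length) :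
    ∀ (fuel j : Nat), j + pat.length ≤ text.length → text.length - pat.length - j < fuel →
      (occursAux pat text (ordSum pat) fuel (ordSum ((text.drop j).take pat.length)) j = true
        ↔ ∃ j', j ≤ j' ∧ pat <+: text.drop j') := by
  intro fuel
  induction fuel with
  | zero => intro j _ hf; omega
  | succ f ih =>
    intro j hjm hf
    have hpre : ((text.drop j).take pat.length = pat) ↔ pat <+: text.drop j := by
      constructor
      · intro he
        rw [List.prefix_iff_eq_take, he]
      · intro hp
        exact (List.prefix_iff_eq_take.mp hp).symm
    by_cases hP : pat <+: text.drop j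
    · have hc : ordSum ((text.drop j).take pat.length) = ordSum pat ∧
          (text.drop j).take pat.length = pat := by
        have he := hpre.mpr hP
        exact ⟨by rw [he], he⟩
      rw [occursAux, if_pos hc]
      exact ⟨fun _ => ⟨j, le_refl j, hP⟩, fun _ => rfl⟩
    · have hc : ¬ (ordSum ((text.drop j).take pat.length) = ordSum pat ∧
          (text.drop j).take pat.length = pat) := by
        rintro ⟨_, he⟩
        exact hP (hpre.mp he)
      rw [occursAux, if_neg hc]
      by_cases hend : text.length ≤ j + pat.length
      · rw [if_pos hend]
        constructor
        · intro hfalse; cases hfalse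
        · rintro ⟨j', hj1, hj2⟩
          rcases Nat.eq_or_lt_of_le hj1 with rfl | hlt
          · exact absurd hj2 hP
          · have hlen := hj2.length_le
            rw [List.length_drop] at hlen
            omega
      · rw [if_neg hend]
        have hroll : ordSum ((text.drop j).take pat.length)
            + ((text.getD (j + pat.length) ' ').toNat : Int) - ((text.getD j ' ').toNat : Int)
            = ordSum ((text.drop (j + 1)).take pat.length) := by
          obtain ⟨k, hk⟩ : ∃ k, pat.length = k + 1 := ⟨pat.length - 1, by omega⟩
          rw [hk]
          exact ordSum_roll text k j (by omega)
        rw [hroll]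
        rw [ih (j + 1) (by omega) (by omega)]
        constructor
        · rintro ⟨j', h1, h2⟩
          exact ⟨j', by omega, h2⟩
        · rintro ⟨j', h1, h2⟩
          rcases Nat.eq_or_lt_of_le h1 with rfl | hlt
          · exact absurd h2 hP
          · exact ⟨j', by omega, h2⟩

lemma occursChars_eq (pat text : List Char) : occursChars pat text = PySem.Chars.isIn pat text := by
  rcases pat with _ | ⟨c, pat'⟩
  · rw [show occursChars [] text = true from by
      rw [occursChars, if_neg (by simp)]
      rw [occursAux]
      rw [if_pos ⟨rfl, by simp⟩]]
    exact (PySem.Chars.isIn_nil text).symm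
  · set pat := c :: pat' with hpat
    have hm : 1 ≤ pat.length := by simp [hpat]
    by_cases hlt : text.length < pat.length
    · rw [occursChars, if_pos hlt]
      have : ¬ pat <:+: text := by
        intro hinf
        have := hinf.length_le
        omega
      rw [eq_comm, PySem.Chars.isIn_eq_false_iff]
      exact this
    · rw [occursChars, if_neg hlt]
      have h0 : text.take pat.length = (text.drop 0).take pat.length := by simp
      rw [h0]
      have hiff := occursAux_iff pat text hm (text.length + 1) 0 (by omega) (by omega)
      have hiff2 : (∃ j', 0 ≤ j' ∧ pat <+: text.drop j') ↔ PySem.Chars.isIn pat text = true := by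
        rw [← PySem.Chars.exists_prefix_drop_iff_isIn]
        constructor
        · rintro ⟨j, _, hj⟩; exact ⟨j, hj⟩
        · rintro ⟨j, hj⟩; exact ⟨j, Nat.zero_le j, hj⟩
      rw [Bool.eq_iff_iff, hiff, hiff2]

lemma occursStr_eq (pat text : String) : occursStr pat text = PySem.Str.isIn pat text := by
  rw [PySem.Str.isIn_eq]
  exact occursChars_eq pat.toList text.toList

-- the split of a sentence is never the empty list (matches Python: ''.split(' ') == [''])
lemma splitOn_go_ne_nil (sep : List Char) :
    ∀ (fuel : Nat) (l cur : List Char) (accs : List (List Char)),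
      PySem.Chars.splitOn.go sep fuel l cur accs ≠ [] := by
  intro fuel
  induction fuel with
  | zero => intro l cur accs; simp [PySem.Chars.splitOn.go]
  | succ f ih =>
    intro l cur accs
    cases l with
    | nil => simp [PySem.Chars.splitOn.go]
    | cons c rest =>
      rw [PySem.Chars.splitOn.go]
      split
      · exact ih _ _ _
      · exact ih _ _ _

lemma tokens_ne_nil (s : String) : (PySem.Str.split? s " ").getD [] ≠ [] := by
  simp only [PySem.Str.split?, PySem.Chars.split?,
    show (" " : String).toList = [' '] from rfl]
  rw [if_neg (by simp)]
  simp only [Option.map_some, Option.getD_some, ne_eq, List.map_eq_nil_iff]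
  unfold PySem.Chars.splitOn
  exact splitOn_go_ne_nil [' '] _ _ _ _

lemma innerA_any_aux (tokens : List String) (acc : String) (n : Int) (b : Int) :
    ∀ (k : Nat) (a : Int), (b - a).toNat = k →
      innerA tokens acc n (PySem.List.pyRange a b)
      = (PySem.List.pyRange a b).any
          (fun i => decide (i + n ≤ (tokens.length : Int)) &&
            PySem.Str.isIn (PySem.Str.join " " (PySem.List.slice tokens (some i) (some (i + n)))) acc) := by
  intro k
  induction k with
  | zero =>
    intro a hk
    rw [PySem.List.pyRange_one_eq_nil (by omega)]
    rfl
  | succ k ih =>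
    intro a hk
    rw [PySem.List.pyRange_one_cons (by omega : a < b)]
    rw [List.any_cons]
    by_cases hbrk : (tokens.length : Int) < a + n
    · have h2 : ((PySem.List.pyRange (a + 1) b).any
          (fun i => decide (i + n ≤ (tokens.length : Int)) &&
            PySem.Str.isIn (PySem.Str.join " " (PySem.List.slice tokens (some i) (some (i + n)))) acc)) = false := by
        rw [List.any_eq_false]
        intro i hi
        have hmem := PySem.List.mem_pyRange_one.mp hi
        simp only [Bool.and_eq_true, decide_eq_true_eq, not_and]
        intro hle
        omega
      rw [h2, innerA, if_pos hbrk]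
      simp [show ¬(a + n ≤ (tokens.length : Int)) from by omega]
    · rw [innerA, if_neg hbrk]
      rw [show decide (a + n ≤ (tokens.length : Int)) = true from by
        simp only [decide_eq_true_eq]; omega]
      rw [Bool.true_and]
      cases hIn : PySem.Str.isIn (PySem.Str.join " " (PySem.List.slice tokens (some a) (some (a + n)))) acc
      · rw [if_neg (by simp)]
        rw [Bool.false_or]
        exact ih (a + 1) (by omega)
      · rw [if_pos rfl]
        rw [Bool.true_or]

lemma innerA_any (tokens : List String) (acc : String) (n : Int) (a b : Int) :
    innerA tokens acc n (PySem.List.pyRange a b)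
      = (PySem.List.pyRange a b).any
          (fun i => decide (i + n ≤ (tokens.length : Int)) &&
            PySem.Str.isIn (PySem.Str.join " " (PySem.List.slice tokens (some i) (some (i + n)))) acc) :=
  innerA_any_aux tokens acc n b _ a rfl

-- for n ≥ 1, A's break-at-(i+n>s_len) loop scans exactly the starts 0 … s_len-n
lemma inner_eq (tokens : List String) (acc : String) (n : Int) (hn : 1 ≤ n) :
    innerA tokens acc n (PySem.List.pyRange 0 ((tokens.length : Int)))
      = (PySem.List.pyRange 0 ((tokens.length : Int) - n + 1)).any
          (fun i => occursStr (PySem.Str.join " " (PySem.List.slice tokens (some i) (some (i + n)))) acc) := by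
  rw [innerA_any]
  simp only [occursStr_eq]
  rw [Bool.eq_iff_iff, List.any_eq_true, List.any_eq_true]
  constructor
  · rintro ⟨i, hi, hp⟩
    have hmem := PySem.List.mem_pyRange_one.mp hi
    simp only [Bool.and_eq_true, decide_eq_true_eq] at hp
    exact ⟨i, PySem.List.mem_pyRange_one.mpr ⟨by omega, by omega⟩, hp.2⟩
  · rintro ⟨i, hi, hp⟩
    have hmem := PySem.List.mem_pyRange_one.mp hi
    refine ⟨i, PySem.List.mem_pyRange_one.mpr ⟨by omega, by omega⟩, ?_⟩
    simp only [Bool.and_eq_true, decide_eq_true_eq]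
    exact ⟨by omega, hp⟩

lemma goA_eq_goB (n : Int) (hn : 1 ≤ n) : ∀ (rest : List String) (acc : String),
    goA rest acc n = goB rest acc n := by
  intro rest
  induction rest with
  | nil => intro acc; rfl
  | cons s r ih =>
    intro acc
    simp only [goA, goB]
    rw [inner_eq _ acc n hn]
    split
    · rfl
    · exact ih _

lemma innerA_nonpos_true (s acc : String) (n : Int) (hn : n ≤ 0) :
    innerA ((PySem.Str.split? s " ").getD []) acc n
        (PySem.List.pyRange 0 ((((PySem.Str.split? s " ").getD []).length : Int))) = true := by
  have hm : 1 ≤ ((PySem.Str.split? s " ").getD []).length :=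
    List.length_pos_of_ne_nil (tokens_ne_nil s)
  have hisin : ∀ acc' : String, PySem.Str.isIn (PySem.Str.join " " ([] : List String)) acc' = true := by
    intro acc'
    rw [PySem.Str.isIn_eq]
    rw [show (PySem.Str.join " " ([] : List String)).toList = [] from by
      rw [PySem.Str.toList_join]; simp [PySem.Chars.join_nil]]
    exact PySem.Chars.isIn_nil _
  rw [innerA_any, List.any_eq_true]
  by_cases hcase : -n < (((PySem.Str.split? s " ").getD []).length : Int)
  · refine ⟨-n, PySem.List.mem_pyRange_one.mpr ⟨by omega, by omega⟩, ?_⟩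
    have hslice : PySem.List.slice ((PySem.Str.split? s " ").getD [])
        (some (-n)) (some (-n + n)) = [] := by
      rw [show -n + n = (0 : Int) from by ring]
      rw [PySem.List.slice_toNat _ (a := -n) (b := 0) (by omega) (by omega)]
      simp
    rw [hslice]
    simp only [Bool.and_eq_true, decide_eq_true_eq]
    exact ⟨by omega, hisin acc⟩
  · refine ⟨0, PySem.List.mem_pyRange_one.mpr ⟨le_refl 0, by exact_mod_cast hm⟩, ?_⟩
    have hslice : PySem.List.slice ((PySem.Str.split? s " ").getD [])
        (some 0) (some (0 + n)) = [] := by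
      apply List.eq_nil_of_length_eq_zero
      rw [PySem.List.length_slice]
      have h1 : PySem.List.clampIdx ((PySem.Str.split? s " ").getD []).length (0 + n) = 0 := by
        simp only [PySem.List.clampIdx]
        split_ifs <;> omega
      have h2 : PySem.List.clampIdx ((PySem.Str.split? s " ").getD []).length 0 = 0 := by
        simp [PySem.List.clampIdx]
      rw [h1, h2]
    rw [hslice]
    simp only [Bool.and_eq_true, decide_eq_true_eq]
    exact ⟨by omega, hisin acc⟩

theorem check_n_gram_spec_aux : ∀ (sentences : List String) (n : Int),
    Pre_check_n_gram sentences n → check_n_gram sentences n = check_n_gram_alt sentences n := by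
  intro sentences n hpre
  match sentences with
  | [] => exact absurd rfl hpre
  | s0 :: rest =>
    by_cases hn : n ≤ 0
    · show goA rest s0 n = _
      rw [check_n_gram_alt, if_pos hn]
      cases rest with
      | nil => rfl
      | cons s r =>
        rw [show goA (s :: r) s0 n = (if innerA ((PySem.Str.split? s " ").getD []) s0 n
            (PySem.List.pyRange 0 ((((PySem.Str.split? s " ").getD []).length : Int))) then false
            else goA r (s0 ++ " " ++ s) n) from rfl]
        rw [innerA_nonpos_true s s0 n hn]
        simp
    · show goA rest s0 n = _
      rw [check_n_gram_alt, if_neg hn]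
      exact goA_eq_goB n (by omega) rest s0

-- ===== VERDICT (by name: the statement is the Claim_ definition above) =====
theorem check_n_gram_spec : Claim_equal_check_n_gram := by
  intro sentences n _ hpre
  exact check_n_gram_spec_aux sentences n hpre
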